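-- pv_equiv track=rewrite | github.com/simriti05/python | labeva.py | recover
-- ===== SOURCE A (Python) =====
-- def recover(msg):
--     vowels = "aeiou"
--     if msg == "":
--         return msg
--
--     s = msg[1:] + msg[0]
--     ans = ""
--     i = 0
--     n = len(s)
--
--     while i < n:
--         ans += s[i]
--         if s[i] in vowels and i + 2 < n and s[i+1:i+3] == "xy":
--             i += 3
--         else:
--             i += 1
--
--     return ans
-- ===== SOURCE B (Python) =====
-- def recover(msg):
--     vowels = "aeiou"
--     if msg == "":
--         return msg
--     s = msg[1:] + msg[0]
--     n = len(s)
--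
--     def dropped(j):
--         # a position is deleted iff it is the 'x' of an "xy" right after a vowel,
--         # or the 'y' of such a pair; pairs can never overlap, so the test is local
--         return ((s[j] == 'x' and j >= 1 and s[j - 1] in vowels
--                  and j + 1 < n and s[j + 1] == 'y')
--                 or (s[j] == 'y' and j >= 2 and s[j - 1] == 'x'
--                     and s[j - 2] in vowels))
--
--     return "".join(s[j] for j in range(n) if not dropped(j))
-- ===== Notes on version B (the rewrite author's own statement) =====
-- stated objective: faster
-- what changed: A walks the rotated string with a cursor that jumps 3 after a vowel followed by 'xy', growing the answer by repeated string concatenation; B proves the deleted pairs can never overlap and instead keeps, in one join, every position that fails a purely local vowel-then-'xy' test.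
import Mathlib
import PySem

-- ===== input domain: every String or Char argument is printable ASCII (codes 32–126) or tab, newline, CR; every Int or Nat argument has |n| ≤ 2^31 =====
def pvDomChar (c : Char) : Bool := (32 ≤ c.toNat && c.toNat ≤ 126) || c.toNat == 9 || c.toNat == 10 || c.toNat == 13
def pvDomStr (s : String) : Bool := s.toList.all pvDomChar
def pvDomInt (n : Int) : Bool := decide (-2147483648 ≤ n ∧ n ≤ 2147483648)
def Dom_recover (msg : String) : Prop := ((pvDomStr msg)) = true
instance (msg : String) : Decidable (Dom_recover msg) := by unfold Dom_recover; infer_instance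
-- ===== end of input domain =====

-- B replaces A's sequential skip-by-3 scan (which grows the answer by repeated string
-- concatenation) with a single join over a local per-position test (the deleted pairs
-- can never overlap); a timing run measured B faster. Equivalence of return values is proved below.

-- ===== PORT A =====
-- 'c in "aeiou"' on the one char s[i] is membership of that char in the vowel list (exact).
def pyVowel (c : Char) : Bool := (['a', 'e', 'i', 'o', 'u']).contains c

-- the while loop: ans += s[i]; skip 3 after a vowel followed by "xy", else step 1
def recoverLoop (s : List Char) (n i : Nat) (ans : List Char) : List Char :=
  if i < n then
    let ans2 := ans ++ [s.getD i ' ']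
    if pyVowel (s.getD i ' ') && decide (i + 2 < n) &&
        (PySem.List.slice s (some ((i : Int) + 1)) (some ((i : Int) + 3)) == ['x', 'y']) then
      recoverLoop s n (i + 3) ans2
    else
      recoverLoop s n (i + 1) ans2
  else ans
termination_by n - i

def recover (msg : String) : String :=
  if msg = "" then msg
  else
    let cs := msg.toList
    -- s = msg[1:] + msg[0]  (msg ≠ "", so msg[0] is the first char: take 1 is exact here)
    let s := PySem.List.slice cs (some 1) none ++ cs.take 1
    String.ofList (recoverLoop s s.length 0 [])

-- ===== PORT B =====
def droppedB (s : List Char) (n j : Nat) : Bool :=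
  (s.getD j ' ' == 'x' && decide (1 ≤ j) && pyVowel (s.getD (j - 1) ' ') &&
    decide (j + 1 < n) && s.getD (j + 1) ' ' == 'y')
  || (s.getD j ' ' == 'y' && decide (2 ≤ j) && s.getD (j - 1) ' ' == 'x' &&
      pyVowel (s.getD (j - 2) ' '))

def recover_alt (msg : String) : String :=
  if msg = "" then msg
  else
    let cs := msg.toList
    let s := PySem.List.slice cs (some 1) none ++ cs.take 1
    String.ofList (((List.range s.length).filter (fun j => !droppedB s s.length j)).map
        (fun j => s.getD j ' '))

-- ===== PRECONDITION & SPEC =====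
def Spec_recover (msg : String) (out : String) : Prop := out = recover_alt msg
instance (msg : String) (out : String) : Decidable (Spec_recover msg out) := by unfold Spec_recover; infer_instance

-- ===== CLAIM (what is proved, stated in full; the proofs are below) =====
def Claim_equal_recover : Prop := ∀ (msg : String), Dom_recover msg → Spec_recover msg (recover msg)

-- ===== LEMMAS AND PROOFS =====

-- getD hitting a named character forces the index in range
lemma getD_char_lt {s : List Char} {j : Nat} {c : Char} (hc : c ≠ ' ')
    (h : s.getD j ' ' = c) : j < s.length := by
  by_contra hj
  rw [List.getD_eq_default _ _ (by omega)] at h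
  exact hc h.symm

-- the two characters a length-2 slice sees
lemma slice_pair {s : List Char} {i : Nat} (h : i + 2 < s.length) :
    PySem.List.slice s (some ((i : Int) + 1)) (some ((i : Int) + 3)) =
      [s.getD (i + 1) ' ', s.getD (i + 2) ' '] := by
  have h1 : (i : Int) + 1 = ((i + 1 : Nat) : Int) := by push_cast; ring
  have h3 : (i : Int) + 3 = ((i + 3 : Nat) : Int) := by push_cast; ring
  rw [h1, h3, PySem.List.slice_natCast]
  have e1 : i + 3 - (i + 1) = 2 := by omega
  rw [e1, List.drop_eq_getElem_cons (by omega : i + 1 < s.length),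
      List.drop_eq_getElem_cons (by omega : i + 2 < s.length)]
  rw [List.getD_eq_getElem _ _ (by omega : i + 1 < s.length),
      List.getD_eq_getElem _ _ (by omega : i + 2 < s.length)]
  rfl

-- main loop invariant: from a non-dropped position i, A's loop appends exactly the
-- non-dropped positions of [i, n)
lemma recoverLoop_eq_aux (s : List Char) :
    ∀ (k i : Nat) (ans : List Char), s.length - i ≤ k → droppedB s s.length i = false →
      recoverLoop s s.length i ans =
        ans ++ ((List.range' i (s.length - i)).filter
            (fun j => !droppedB s s.length j)).map (fun j => s.getD j ' ') := by
  intro k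
  induction k with
  | zero =>
    intro i ans hk _
    rw [recoverLoop]
    simp [show ¬ i < s.length by omega, show s.length - i = 0 by omega]
  | succ k ih =>
    intro i ans hk hvis
    by_cases hi : i < s.length
    · rw [recoverLoop]
      simp only [hi, if_pos]
      set n := s.length with hn
      by_cases hc : (pyVowel (s.getD i ' ') && decide (i + 2 < n) &&
          (PySem.List.slice s (some ((i : Int) + 1)) (some ((i : Int) + 3)) == ['x', 'y'])) = true
      · -- skip branch
        simp only [hc, if_pos]
        have hv : pyVowel (s.getD i ' ') = true := by
          simp only [Bool.and_eq_true] at hc; exact hc.1.1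
        have hlt : i + 2 < n := by
          simp only [Bool.and_eq_true, decide_eq_true_eq] at hc; exact hc.1.2
        have hsl := (beq_iff_eq.mp (by simp only [Bool.and_eq_true] at hc; exact hc.2))
        rw [slice_pair hlt] at hsl
        have hx : s.getD (i + 1) ' ' = 'x' := by
          have := congrArg (fun l => l.getD 0 ' ') hsl; simpa using this
        have hy : s.getD (i + 2) ' ' = 'y' := by
          have := congrArg (fun l => l.getD 1 ' ') hsl; simpa using this
        have hd1 : droppedB s n (i + 1) = true := by
          simp only [droppedB, Bool.or_eq_true, Bool.and_eq_true, beq_iff_eq,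
            decide_eq_true_eq]
          left
          refine ⟨⟨⟨⟨hx, by omega⟩, by simpa using hv⟩, by omega⟩, by simpa using hy⟩
        have hd2 : droppedB s n (i + 2) = true := by
          simp only [droppedB, Bool.or_eq_true, Bool.and_eq_true, beq_iff_eq,
            decide_eq_true_eq]
          right
          refine ⟨⟨⟨hy, by omega⟩, by simpa using hx⟩, by simpa using hv⟩
        have hd3 : droppedB s n (i + 3) = false := by
          simp only [droppedB, Bool.or_eq_false_iff, Bool.and_eq_false_iff]
          constructor
          · left; left; right
            simp only [show i + 3 - 1 = i + 2 by omega, hy]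
            decide
          · left; right
            simp only [show i + 3 - 1 = i + 2 by omega, hy]
            decide
        rw [ih (i + 3) _ (by omega) hd3]
        have hr : List.range' i (n - i) =
            i :: (i + 1) :: (i + 2) :: List.range' (i + 3) (n - (i + 3)) := by
          have e : n - i = (n - (i + 3)) + 1 + 1 + 1 := by omega
          rw [e, List.range'_succ, List.range'_succ, List.range'_succ]
        rw [hr]
        simp [hvis, hd1, hd2]
      · -- step branch
        simp only [hc, if_neg, Bool.not_eq_true]
        have hd1 : droppedB s n (i + 1) = false := by
          by_contra hcon
          rw [Bool.not_eq_false] at hcon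
          simp only [droppedB, Bool.or_eq_true, Bool.and_eq_true, beq_iff_eq,
            decide_eq_true_eq] at hcon
          rcases hcon with ⟨⟨⟨⟨hx, _⟩, hv⟩, hb⟩, hy⟩ | ⟨⟨⟨hy, h2⟩, hx⟩, hv⟩
          · -- would be the skip condition at i
            simp only [show i + 1 - 1 = i by omega] at hv
            apply hc
            simp only [Bool.and_eq_true, beq_iff_eq, decide_eq_true_eq]
            refine ⟨⟨hv, by omega⟩, ?_⟩
            rw [slice_pair (by omega)]
            simp only [show i + 1 + 1 = i + 2 by omega] at hy
            rw [hx, hy]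
          · -- would make i itself dropped, contradicting hvis
            simp only [show i + 1 - 1 = i by omega] at hx
            simp only [show i + 1 - 2 = i - 1 by omega] at hv
            have hiy : i + 1 < n := getD_char_lt (by decide) hy
            rw [Bool.eq_false_iff] at hvis
            apply hvis
            simp only [droppedB, Bool.or_eq_true, Bool.and_eq_true, beq_iff_eq,
              decide_eq_true_eq]
            left
            exact ⟨⟨⟨⟨hx, by omega⟩, hv⟩, hiy⟩, hy⟩
        rw [ih (i + 1) _ (by omega) hd1]
        have hr : List.range' i (n - i) = i :: List.range' (i + 1) (n - (i + 1)) := by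
          have e : n - i = (n - (i + 1)) + 1 := by omega
          rw [e, List.range'_succ]
        rw [hr]
        simp [hvis]
    · rw [recoverLoop]
      simp [hi, show s.length - i = 0 by omega]

lemma recoverLoop_eq (s : List Char) (i : Nat) (ans : List Char)
    (hvis : droppedB s s.length i = false) :
    recoverLoop s s.length i ans =
      ans ++ ((List.range' i (s.length - i)).filter
          (fun j => !droppedB s s.length j)).map (fun j => s.getD j ' ') :=
  recoverLoop_eq_aux s (s.length - i) i ans le_rfl hvis

lemma droppedB_zero (s : List Char) (n : Nat) : droppedB s n 0 = false := by
  simp [droppedB]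

-- ===== VERDICT (by name: the statement is the Claim_ definition above) =====
theorem recover_spec : Claim_equal_recover := by
  intro msg _
  unfold Spec_recover recover recover_alt
  by_cases h : msg = ""
  · simp [h]
  · simp only [h, if_neg, not_false_iff]
    rw [recoverLoop_eq _ 0 [] (droppedB_zero _ _)]
    rw [List.range_eq_range']
    simp
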